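-- pv_equiv track=rewrite | github.com/TengFeiyang01/Algorithm | VSCODE/Training/Py/t.py | solve
-- ===== SOURCE A (Python) =====
-- from collections import defaultdict
--
-- def solve(relations):
--     d = defaultdict(int)
--     adj = defaultdict(list)
--
--     for relation in relations:
--         a, b = relation.split("->")
--         d[b] = d.get(b, 0)
--         d[a] += 1
--         adj[b].append(a)
--
--     q = []
--     for u in d:
--         if d[u] == 0:
--             q.append(u)
--     ans = []
--     while q:
--         q.sort()
--         t = []
--
--         for u in q:
--             ans.append(u)
--
--             for v in adj[u]:
--                 d[v] -= 1
--                 if d[v] == 0: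
--                     t.append(v)
--         q = t
--     return ans
-- ===== SOURCE B (Python) =====
-- def solve(relations):
--     # Longest-path dynamic programming instead of BFS: a node's output level equals the
--     # length of its longest chain of "->" targets. Relax a depth table |nodes| times;
--     # nodes that can reach a cycle exceed every finite depth and are dropped.
--     tgts = {}
--     for relation in relations:
--         a, b = relation.split("->")
--         tgts.setdefault(b, [])
--         tgts.setdefault(a, []).append(b)
--     nodes = list(tgts)
--     n = len(nodes)
--     depth = {u: 0 for u in nodes}
--     for _ in range(n):
--         depth = {u: 1 + max(depth[v] for v in tgts[u]) if tgts[u] else 0 for u in nodes}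
--     return sorted((u for u in nodes if depth[u] < n), key=lambda u: (depth[u], u))
-- ===== Notes on version B (the rewrite author's own statement) =====
-- stated objective: alternative
-- what changed: A runs Kahn's queue-based BFS with in-degree counters and emits each frontier sorted; B builds no queue and no in-degree map at all: it computes every node's longest-target-chain depth by |V| rounds of dynamic-programming relaxation over a depth table, drops nodes whose depth reaches |V| (those that reach a cycle), and returns one global sort by (depth, name).
import Mathlib
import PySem

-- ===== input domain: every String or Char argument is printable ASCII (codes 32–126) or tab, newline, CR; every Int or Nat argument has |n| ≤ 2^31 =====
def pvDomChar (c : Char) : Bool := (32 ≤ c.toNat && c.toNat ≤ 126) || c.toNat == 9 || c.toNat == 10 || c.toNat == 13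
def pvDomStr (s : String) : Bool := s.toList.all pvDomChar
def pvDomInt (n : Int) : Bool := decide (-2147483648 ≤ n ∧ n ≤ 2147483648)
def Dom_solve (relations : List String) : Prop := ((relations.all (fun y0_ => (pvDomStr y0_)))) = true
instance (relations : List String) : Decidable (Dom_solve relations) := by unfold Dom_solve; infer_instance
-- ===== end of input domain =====

-- B replaces Kahn's queue/in-degree BFS by longest-chain-depth dynamic programming plus one
-- global (depth, name) sort; objective: alternative (not claimed faster).

-- ===== PORT A =====
-- one relation: a, b = relation.split("->"); d[b] = d.get(b, 0); d[a] += 1; adj[b].append(a)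
def solveParseStepA (st : PySem.Dict String Int × PySem.Dict String (List String))
    (relation : String) : PySem.Dict String Int × PySem.Dict String (List String) :=
  match PySem.Str.split? relation "->" with
  | some [a, b] =>
    let d := st.1.insert b (st.1.getD b 0)
    let d := d.insert a (d.getD a 0 + 1)
    (d, st.2.insert b (st.2.getD b [] ++ [a]))
  | _ => st  -- a, b = …: anything else raises ValueError (excluded by Pre_solve)

-- while-loop of A, with fuel as a totality guard only (fuel = node count + 1 always suffices,
-- which the equivalence proof establishes)
def solveLoopA : Nat → PySem.Dict String Int → PySem.Dict String (List String) →
    List String → List String → List String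
  | 0, _, _, _, ans => ans
  | fuel + 1, d, adj, q, ans =>
    if q = [] then ans else
      -- q.sort(); then for u in q: ans.append(u); for v in adj[u]: d[v] -= 1; if d[v] == 0: t.append(v)
      let qs := PySem.List.sorted q (fun u => u) false
      let st := qs.foldl
        (fun (st : PySem.Dict String Int × List String × List String) u =>
          let ans := st.2.2 ++ [u]
          let inner := (adj.getD u []).foldl
            (fun (st2 : PySem.Dict String Int × List String) v =>
              let c := st2.1.getD v 0 - 1
              (st2.1.insert v c, if c = 0 then st2.2 ++ [v] else st2.2))
            (st.1, st.2.1)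
          (inner.1, inner.2, ans))
        (d, [], ans)
      solveLoopA fuel st.1 adj st.2.1 st.2.2

def solve (relations : List String) : List String :=
  let st := relations.foldl solveParseStepA (PySem.Dict.empty, PySem.Dict.empty)
  let d := st.1
  let adj := st.2
  let q := d.keys.foldl (fun q u => if d.getD u 0 = 0 then q ++ [u] else q) []
  solveLoopA (d.size + 1) d adj q []

-- ===== PORT B =====
-- one relation: a, b = relation.split("->"); tgts.setdefault(b, []); tgts.setdefault(a, []).append(b)
def solveParseStepB (tgts : PySem.Dict String (List String)) (relation : String) :
    PySem.Dict String (List String) :=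
  match PySem.Str.split? relation "->" with
  | some [a, b] => (tgts.setdefault b []).modify a [] (fun l => l ++ [b])
  | _ => tgts  -- a, b = …: anything else raises ValueError (excluded by Pre_solve)

-- depth = {u: 1 + max(depth[v] for v in tgts[u]) if tgts[u] else 0 for u in nodes}
def solveStepB (tgts : PySem.Dict String (List String)) (nodes : List String)
    (depth : PySem.Dict String Int) : PySem.Dict String Int :=
  nodes.foldl
    (fun acc u =>
      acc.insert u
        (match (tgts.getD u []).map (fun v => depth.getD v 0) with
         | [] => (0 : Int)
         | x :: t => 1 + t.foldl max x))
    PySem.Dict.empty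

-- for _ in range(n): depth = {…}
def solveIterB (tgts : PySem.Dict String (List String)) (nodes : List String) :
    Nat → PySem.Dict String Int → PySem.Dict String Int
  | 0, depth => depth
  | k + 1, depth => solveIterB tgts nodes k (solveStepB tgts nodes depth)

def solve_alt (relations : List String) : List String :=
  let tgts := relations.foldl solveParseStepB PySem.Dict.empty
  let nodes := tgts.keys
  let n := nodes.length
  let depth0 := nodes.foldl (fun d u => d.insert u (0 : Int)) PySem.Dict.empty
  let depth := solveIterB tgts nodes n depth0
  PySem.List.sorted2 (nodes.filter (fun u => decide (depth.getD u 0 < (n : Int))))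
    (fun u => depth.getD u 0) (fun u => u) false

-- ===== PRECONDITION & SPEC =====
-- Pre_: each relation must split on "->" into exactly two pieces; otherwise Python's
-- 'a, b = relation.split("->")' raises ValueError in both A and B.
def Pre_solve (relations : List String) : Prop :=
  ∀ r ∈ relations, ((PySem.Str.split? r "->").getD []).length = 2
instance (relations : List String) : Decidable (Pre_solve relations) := by
  unfold Pre_solve; infer_instance

def pvWitness_solve : List String := ["b->a", "c->a", "d->b", "d->c", "e->e"]

def Spec_solve (relations : List String) (out : List String) : Prop := out = solve_alt relations
instance (relations : List String) (out : List String) : Decidable (Spec_solve relations out) := by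
  unfold Spec_solve; infer_instance

-- ===== CLAIM (what is proved, stated in full; the proofs are below) =====
def Claim_equal_solve : Prop := ∀ (relations : List String), Dom_solve relations → Pre_solve relations → Spec_solve relations (solve relations)

-- ===== LEMMAS AND PROOFS =====

def pvFval (d : PySem.Dict String Int) (k : String) : Int := d.getD k 0
def pvT (tgts : PySem.Dict String (List String)) (u : String) : List String := tgts.getD u []

def pvInv (dA : PySem.Dict String Int) (adj tgts : PySem.Dict String (List String)) : Prop :=
  dA.keys = tgts.keys ∧
  (∀ u, dA.getD u 0 = ((tgts.getD u []).length : Int)) ∧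
  (∀ u v, (adj.getD u []).count v = (tgts.getD v []).count u) ∧
  (∀ u v, v ∈ adj.getD u [] → v ∈ dA.keys) ∧
  (∀ u v, v ∈ tgts.getD u [] → v ∈ tgts.keys)

lemma pvParseStep (st : PySem.Dict String Int × PySem.Dict String (List String))
    (tgts : PySem.Dict String (List String)) (r : String)
    (h : pvInv st.1 st.2 tgts) :
    pvInv (solveParseStepA st r).1 (solveParseStepA st r).2 (solveParseStepB tgts r) := by
  obtain ⟨hk, hd, hc, hm, ht⟩ := h
  unfold solveParseStepA solveParseStepB
  rcases hsp : PySem.Str.split? r "->" with _ | l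
  · exact ⟨hk, hd, hc, hm, ht⟩
  · match l with
    | [] => exact ⟨hk, hd, hc, hm, ht⟩
    | [a] => exact ⟨hk, hd, hc, hm, ht⟩
    | a :: b :: c :: tl => exact ⟨hk, hd, hc, hm, ht⟩
    | [a, b] =>
      simp only
      -- abbreviations
      have hcontains : ∀ x, st.1.contains x = tgts.contains x := by
        intro x
        rw [PySem.Dict.contains_eq_decide_mem_keys, PySem.Dict.contains_eq_decide_mem_keys, hk]
      -- value views are unchanged by the first operation on each side
      have hd1 : ∀ u, (st.1.insert b (st.1.getD b 0)).getD u 0 = st.1.getD u 0 := by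
        intro u
        rw [PySem.Dict.getD_insert]
        split_ifs with h1
        · subst h1; rfl
        · rfl
      have ht1 : ∀ u, (tgts.setdefault b []).getD u [] = tgts.getD u [] := by
        intro u
        by_cases h1 : u = b
        · subst h1; rw [PySem.Dict.getD_setdefault_self]
        · rw [PySem.Dict.getD_eq_get?_getD, PySem.Dict.get?_setdefault_of_ne _ _ h1,
            ← PySem.Dict.getD_eq_get?_getD]
      have hk1 : (st.1.insert b (st.1.getD b 0)).keys = (tgts.setdefault b []).keys := by
        rw [PySem.Dict.keys_setdefault, ← hcontains]
        cases h1 : st.1.contains b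
        · rw [if_neg (by simp), PySem.Dict.keys_insert_of_not_contains _ _ h1, hk]
        · rw [if_pos rfl, PySem.Dict.keys_insert_of_contains _ _ h1, hk]
      have hcontains1 : ∀ x, (st.1.insert b (st.1.getD b 0)).contains x
          = (tgts.setdefault b []).contains x := by
        intro x
        rw [PySem.Dict.contains_eq_decide_mem_keys, PySem.Dict.contains_eq_decide_mem_keys, hk1]
      have hd2 : ∀ u, ((st.1.insert b (st.1.getD b 0)).insert a
            ((st.1.insert b (st.1.getD b 0)).getD a 0 + 1)).getD u 0
          = if u = a then st.1.getD a 0 + 1 else st.1.getD u 0 := by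
        intro u
        rw [PySem.Dict.getD_insert, hd1, hd1]
      have ht2 : ∀ u, ((tgts.setdefault b []).modify a [] (fun l => l ++ [b])).getD u []
          = if u = a then tgts.getD a [] ++ [b] else tgts.getD u [] := by
        intro u
        rw [PySem.Dict.getD_modify, ht1, ht1]
      have hk2 : ((st.1.insert b (st.1.getD b 0)).insert a
            ((st.1.insert b (st.1.getD b 0)).getD a 0 + 1)).keys
          = ((tgts.setdefault b []).modify a [] (fun l => l ++ [b])).keys := by
        rw [PySem.Dict.keys_modify]
        have e : (tgts.setdefault b []).contains a
            = (st.1.insert b (st.1.getD b 0)).contains a := (hcontains1 a).symm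
        cases h1 : (st.1.insert b (st.1.getD b 0)).contains a
        · rw [PySem.Dict.keys_insert_of_not_contains _ _ h1,
            PySem.Dict.keys_insert_of_not_contains _ _ (e.trans h1), hk1]
        · rw [PySem.Dict.keys_insert_of_contains _ _ h1,
            PySem.Dict.keys_insert_of_contains _ _ (e.trans h1), hk1]
      have hadj : ∀ x, (st.2.insert b (st.2.getD b [] ++ [a])).getD x []
          = if x = b then st.2.getD b [] ++ [a] else st.2.getD x [] := by
        intro x
        rw [PySem.Dict.getD_insert]
      have hcnt1 : ∀ (x y : String), x ≠ y → List.count x [y] = 0 := by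
        intro x y hxy
        simp [List.count_cons, Ne.symm hxy]
      refine ⟨hk2, ?_, ?_, ?_, ?_⟩
      · intro x
        rw [hd2 x, ht2 x]
        by_cases h1 : x = a
        · rw [if_pos h1, if_pos h1, hd a]
          push_cast [List.length_append]
          simp
        · rw [if_neg h1, if_neg h1, hd x]
      · intro x y
        rw [hadj x, ht2 y]
        by_cases h1 : x = b <;> by_cases h2 : y = a
        · rw [if_pos h1, if_pos h2, h1, h2, List.count_append, List.count_append, hc b a]
          simp [List.count_cons]
        · rw [if_pos h1, if_neg h2, h1, List.count_append, hcnt1 y a h2, hc b y]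
          omega
        · rw [if_neg h1, if_pos h2, h2, List.count_append, hcnt1 x b h1, hc x a]
          omega
        · rw [if_neg h1, if_neg h2, hc x y]
      · intro x y hy
        rw [hadj x] at hy
        have hmem : y ∈ st.1.keys → y ∈ ((st.1.insert b (st.1.getD b 0)).insert a
            ((st.1.insert b (st.1.getD b 0)).getD a 0 + 1)).keys := by
          intro h
          rw [PySem.Dict.mem_keys_insert, PySem.Dict.mem_keys_insert]
          exact Or.inr (Or.inr h)
        by_cases h1 : x = b
        · rw [if_pos h1, List.mem_append] at hy
          rcases hy with hy | hy
          · exact hmem (hm b y hy)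
          · rw [List.mem_singleton] at hy
            subst hy
            rw [PySem.Dict.mem_keys_insert]
            exact Or.inl rfl
        · rw [if_neg h1] at hy
          exact hmem (hm x y hy)
      · intro x y hy
        rw [ht2 x] at hy
        have hksd : ∀ z, z ∈ tgts.keys → z ∈ (tgts.setdefault b []).keys := by
          intro z hz
          rw [PySem.Dict.keys_setdefault]
          split_ifs <;> simp [hz]
        have hmem : ∀ z, z ∈ (tgts.setdefault b []).keys →
            z ∈ ((tgts.setdefault b []).modify a [] (fun l => l ++ [b])).keys := by
          intro z hz
          rw [PySem.Dict.keys_modify, PySem.Dict.mem_keys_insert]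
          exact Or.inr hz
        have hbmem : b ∈ (tgts.setdefault b []).keys := by
          rw [PySem.Dict.keys_setdefault]
          cases h1 : tgts.contains b
          · simp
          · rw [if_pos rfl]
            exact (PySem.Dict.contains_iff_mem_keys tgts b).mp h1
        by_cases h1 : x = a
        · rw [if_pos h1, List.mem_append] at hy
          rcases hy with hy | hy
          · exact hmem y (hksd y (ht x y (by rw [h1]; exact hy)))
          · rw [List.mem_singleton] at hy
            subst hy
            exact hmem y hbmem
        · rw [if_neg h1] at hy
          exact hmem y (hksd y (ht x y hy))

def pvBody (f : String → Int) (l : List String) : Int :=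
  match l.map f with
  | [] => 0
  | x :: t => 1 + t.foldl max x

def pvDf (T : String → List String) : Nat → String → Int
  | 0, _ => 0
  | k + 1, u => pvBody (pvDf T k) (T u)

lemma pvBody_congr (f g : String → Int) (l : List String) (h : ∀ v ∈ l, f v = g v) :
    pvBody f l = pvBody g l := by
  unfold pvBody
  rw [List.map_congr_left h]

lemma pvBody_nil (f : String → Int) : pvBody f [] = 0 := rfl

lemma pvRebuild (f : String → Int) :
    ∀ (nodes : List String) (acc : PySem.Dict String Int) (u : String),
    (nodes.foldl (fun acc u => acc.insert u (f u)) acc).getD u 0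
      = if u ∈ nodes then f u else acc.getD u 0 := by
  intro nodes
  induction nodes with
  | nil => intro acc u; simp
  | cons h t ih =>
    intro acc u
    simp only [List.foldl_cons]
    rw [ih]
    by_cases h1 : u ∈ t
    · simp [h1]
    · rw [if_neg h1, PySem.Dict.getD_insert]
      by_cases h2 : u = h <;> simp [h1, h2]

lemma pvStepB_val (tgts : PySem.Dict String (List String)) (nodes : List String)
    (depth : PySem.Dict String Int) (u : String) :
    (solveStepB tgts nodes depth).getD u 0
      = if u ∈ nodes then pvBody (fun v => depth.getD v 0) (pvT tgts u) else 0 := by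
  show (List.foldl (fun acc u => acc.insert u (pvBody (fun v => depth.getD v 0) (pvT tgts u)))
      PySem.Dict.empty nodes).getD u 0 = _
  rw [pvRebuild (fun u => pvBody (fun v => depth.getD v 0) (pvT tgts u)) nodes]
  rw [PySem.Dict.getD_empty]

lemma pvTK (tgts : PySem.Dict String (List String)) (u : String) (h : u ∉ tgts.keys) :
    pvT tgts u = [] := by
  unfold pvT
  apply PySem.Dict.getD_of_not_contains
  rw [PySem.Dict.contains_eq_decide_mem_keys]
  simp [h]

lemma pvIter_val (tgts : PySem.Dict String (List String)) :
    ∀ (k : Nat) (depth : PySem.Dict String Int) (j : Nat),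
    (∀ v, depth.getD v 0 = pvDf (pvT tgts) j v) →
    ∀ u, (solveIterB tgts tgts.keys k depth).getD u 0 = pvDf (pvT tgts) (j + k) u := by
  intro k
  induction k with
  | zero => intro depth j h u; simpa [solveIterB] using h u
  | succ k ih =>
    intro depth j h u
    have hstep : ∀ u, (solveStepB tgts tgts.keys depth).getD u 0 = pvDf (pvT tgts) (j + 1) u := by
      intro u
      rw [pvStepB_val]
      by_cases h1 : u ∈ tgts.keys
      · rw [if_pos h1]
        show pvBody _ _ = pvBody (pvDf (pvT tgts) j) (pvT tgts u)
        exact pvBody_congr _ _ _ (fun v _ => h v)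
      · rw [if_neg h1]
        show (0 : Int) = pvBody (pvDf (pvT tgts) j) (pvT tgts u)
        rw [pvTK tgts u h1, pvBody_nil]
    have : solveIterB tgts tgts.keys (k + 1) depth
        = solveIterB tgts tgts.keys k (solveStepB tgts tgts.keys depth) := rfl
    rw [this, ih _ (j + 1) hstep u]
    congr 1
    omega

lemma pvDepth0_val (nodes : List String) (v : String) :
    (nodes.foldl (fun d u => d.insert u (0 : Int)) PySem.Dict.empty).getD v 0 = 0 := by
  rw [pvRebuild (fun _ => (0 : Int)) nodes]
  split_ifs <;> simp

lemma pvAlt_eq (relations : List String) :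
    solve_alt relations
      = PySem.List.sorted2
          ((relations.foldl solveParseStepB PySem.Dict.empty).keys.filter
            (fun u => decide (pvDf (pvT (relations.foldl solveParseStepB PySem.Dict.empty))
              ((relations.foldl solveParseStepB PySem.Dict.empty).keys.length) u
              < ((relations.foldl solveParseStepB PySem.Dict.empty).keys.length : Int))))
          (fun u => pvDf (pvT (relations.foldl solveParseStepB PySem.Dict.empty))
            ((relations.foldl solveParseStepB PySem.Dict.empty).keys.length) u)
          (fun u => u) false := by
  unfold solve_alt
  simp only
  set tgts := relations.foldl solveParseStepB PySem.Dict.empty with htgts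
  have hval : ∀ u, (solveIterB tgts tgts.keys tgts.keys.length
      (tgts.keys.foldl (fun d u => d.insert u (0 : Int)) PySem.Dict.empty)).getD u 0
      = pvDf (pvT tgts) tgts.keys.length u := by
    intro u
    have := pvIter_val tgts tgts.keys.length
      (tgts.keys.foldl (fun d u => d.insert u (0 : Int)) PySem.Dict.empty) 0
      (fun v => pvDepth0_val tgts.keys v) u
    simpa using this
  have hfun : (fun u => (solveIterB tgts tgts.keys tgts.keys.length
      (tgts.keys.foldl (fun d u => d.insert u (0 : Int)) PySem.Dict.empty)).getD u 0)
      = fun u => pvDf (pvT tgts) tgts.keys.length u := funext hval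
  rw [List.filter_congr (fun x _ => by rw [hval x]), hfun]

-- one edge decrement, the inner-loop body of A (rfl-equal to its lambda)
def pvDec (st : PySem.Dict String Int × List String) (v : String) :
    PySem.Dict String Int × List String :=
  let c := st.1.getD v 0 - 1
  (st.1.insert v c, if c = 0 then st.2 ++ [v] else st.2)

lemma pvDec_fst (L : List String) : ∀ (d : PySem.Dict String Int) (t : List String) (k : String),
    pvFval (L.foldl pvDec (d, t)).1 k = pvFval d k - (L.count k : Int) := by
  induction L with
  | nil => intro d t k; simp [pvFval]
  | cons v L ih =>
    intro d t k
    simp only [List.foldl_cons, List.count_cons]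
    have h := ih (pvDec (d, t) v).1 (pvDec (d, t) v).2 k
    rw [show (((pvDec (d, t) v).1, (pvDec (d, t) v).2) : _ × _) = pvDec (d, t) v from rfl] at h
    rw [h]
    simp only [pvDec, pvFval, PySem.Dict.getD_insert]
    by_cases hkv : k = v
    · subst hkv
      simp
      omega
    · have hvk : ¬ (v = k) := fun h => hkv h.symm
      simp [hkv, hvk]

lemma pvDec_snd (L : List String) : ∀ (d : PySem.Dict String Int) (t : List String),
    ∃ n : List String, (L.foldl pvDec (d, t)).2 = t ++ n ∧ n.Nodup ∧
      ∀ w, w ∈ n ↔ (1 ≤ pvFval d w ∧ pvFval d w ≤ (L.count w : Int)) := by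
  induction L with
  | nil =>
    intro d t
    exact ⟨[], by simp, List.nodup_nil, fun w => by simp; omega⟩
  | cons v L ih =>
    intro d t
    simp only [List.foldl_cons]
    have hstep : L.foldl pvDec (pvDec (d, t) v) = L.foldl pvDec ((pvDec (d, t) v).1, (pvDec (d, t) v).2) := rfl
    obtain ⟨n, hn, hnd, hmem⟩ := ih (pvDec (d, t) v).1 (pvDec (d, t) v).2
    rw [hstep, hn]
    have hfv : ∀ w, pvFval (pvDec (d, t) v).1 w = if w = v then pvFval d v - 1 else pvFval d w := by
      intro w
      simp only [pvDec, pvFval, PySem.Dict.getD_insert]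
    by_cases hc : pvFval d v - 1 = 0
    · -- v just hit 0: appended now
      have hsnd : (pvDec (d, t) v).2 = t ++ [v] := by
        simp only [pvDec]; simp [pvFval] at hc; simp [hc]
      refine ⟨v :: n, by rw [hsnd]; simp, ?_, ?_⟩
      · refine List.nodup_cons.mpr ⟨?_, hnd⟩
        intro hvn
        have := (hmem v).mp hvn
        rw [hfv v] at this; simp at this; omega
      · intro w
        rcases eq_or_ne w v with h | h
        · subst h
          simp only [List.mem_cons, true_or, true_iff, List.count_cons_self]
          refine ⟨by omega, ?_⟩
          push_cast; omega
        · simp only [List.mem_cons, h, false_or]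
          rw [hmem w, hfv w, if_neg h, List.count_cons_of_ne (Ne.symm h)]
    · have hsnd : (pvDec (d, t) v).2 = t := by
        simp only [pvDec]; simp [pvFval] at hc; simp [hc]
      rw [hsnd] at hn ⊢
      refine ⟨n, rfl, hnd, ?_⟩
      intro w
      rw [hmem w, hfv w]
      rcases eq_or_ne w v with h | h
      · subst h
        simp only [List.count_cons_self]
        simp only [pvFval] at hc ⊢
        push_cast; omega
      · rw [if_neg h, List.count_cons_of_ne (Ne.symm h)]

-- A's round: fold of the per-node body = ans ++ qs, with (d, t) folded over the flattened edge list
lemma pvRoundA (adj : PySem.Dict String (List String)) (qs : List String) :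
    ∀ (d : PySem.Dict String Int) (t ans : List String),
    qs.foldl
      (fun (st : PySem.Dict String Int × List String × List String) u =>
        let ans := st.2.2 ++ [u]
        let inner := (adj.getD u []).foldl
          (fun (st2 : PySem.Dict String Int × List String) v =>
            let c := st2.1.getD v 0 - 1
            (st2.1.insert v c, if c = 0 then st2.2 ++ [v] else st2.2))
          (st.1, st.2.1)
        (inner.1, inner.2, ans))
      (d, t, ans)
    = (((qs.flatMap (fun u => adj.getD u [])).foldl pvDec (d, t)).1,
       ((qs.flatMap (fun u => adj.getD u [])).foldl pvDec (d, t)).2,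
       ans ++ qs) := by
  induction qs with
  | nil => intro d t ans; simp
  | cons u qs ih =>
    intro d t ans
    simp only [List.foldl_cons, List.flatMap_cons, List.foldl_append]
    rw [ih]
    have hcons : ans ++ [u] ++ qs = ans ++ u :: qs := by simp
    rw [hcons]
    rfl

-- Python's tuple key (level, name) is the lexicographic product order
lemma pvSorted2_toLex (xs : List String) (k1 : String → Int) :
    PySem.List.sorted2 xs k1 (fun u => u) false
      = PySem.List.sorted xs (fun u => (toLex (k1 u, u) : Lex (Int × String))) false := by
  rw [PySem.List.sorted_eq_foldl_insertBy]
  show List.foldl _ [] xs = _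
  congr 1
  funext acc x
  congr 1
  funext a b
  have : (toLex (k1 a, a) : Lex (Int × String)) < toLex (k1 b, b) ↔
      k1 a < k1 b ∨ (k1 a = k1 b ∧ a < b) := Prod.Lex.lt_iff
  by_cases h1 : k1 a < k1 b <;> by_cases h2 : k1 b < k1 a <;> by_cases h3 : a < b <;>
    simp [h1, h2, h3, this] <;> omega

-- the parse loop keeps the in-degree dict's keys unique
lemma pvParse_nodup (relations : List String) :
    ∀ (st : PySem.Dict String Int × PySem.Dict String (List String)), st.1.keys.Nodup →
    (relations.foldl solveParseStepA st).1.keys.Nodup := by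
  induction relations with
  | nil => intro st h; exact h
  | cons r rs ih =>
    intro st h
    simp only [List.foldl_cons]
    apply ih
    unfold solveParseStepA
    rcases hsp : PySem.Str.split? r "->" with _ | l
    · simpa [hsp] using h
    · match l with
      | [] => simpa [hsp] using h
      | [a] => simpa [hsp] using h
      | [a, b] =>
        exact PySem.Dict.nodup_keys_insert _ _ _ (PySem.Dict.nodup_keys_insert _ _ _ h)
      | a :: b :: c :: tl => simpa [hsp] using h

-- fold the single-step parse invariant over the whole relations list
lemma pvParseInv (relations : List String) :
    ∀ (st : PySem.Dict String Int × PySem.Dict String (List String))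
      (tgts : PySem.Dict String (List String)), pvInv st.1 st.2 tgts →
    pvInv (relations.foldl solveParseStepA st).1 (relations.foldl solveParseStepA st).2
      (relations.foldl solveParseStepB tgts) := by
  induction relations with
  | nil => intro st tgts h; exact h
  | cons r rs ih =>
    intro st tgts h
    simp only [List.foldl_cons]
    exact ih _ _ (pvParseStep st tgts r h)

lemma pvInv_empty : pvInv PySem.Dict.empty PySem.Dict.empty PySem.Dict.empty := by
  refine ⟨rfl, ?_, ?_, ?_, ?_⟩ <;> intro u <;> simp [PySem.Dict.getD_empty]

lemma pvFoldlMax_le (t : List Int) : ∀ (x m : Int), x ≤ m → (∀ y ∈ t, y ≤ m) →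
    t.foldl max x ≤ m := by
  induction t with
  | nil => intro x m hx _; simpa using hx
  | cons y t ih =>
    intro x m hx h
    simp only [List.foldl_cons]
    exact ih _ m (max_le hx (h y List.mem_cons_self)) (fun z hz => h z (List.mem_cons_of_mem _ hz))

lemma pvBody_le (f : String → Int) (l : List String) (m : Int)
    (hub : ∀ w ∈ l, f w ≤ m) (hne : l ≠ []) : pvBody f l ≤ 1 + m := by
  match l with
  | [] => exact absurd rfl hne
  | w :: ls =>
    show 1 + (ls.map f).foldl max (f w) ≤ 1 + m
    have h1 : f w ≤ m := hub w List.mem_cons_self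
    have h2 : ∀ y ∈ ls.map f, y ≤ m := by
      intro y hy
      obtain ⟨z, hz, rfl⟩ := List.mem_map.mp hy
      exact hub z (List.mem_cons_of_mem _ hz)
    have := pvFoldlMax_le (ls.map f) (f w) m h1 h2
    omega

lemma pvBody_ge_mem (f : String → Int) (l : List String) (w : String) (hw : w ∈ l) :
    1 + f w ≤ pvBody f l := by
  match l with
  | [] => cases hw
  | v :: ls =>
    show 1 + f w ≤ 1 + (ls.map f).foldl max (f v)
    rcases List.mem_cons.mp hw with h | h
    · subst h
      have := (PySem.List.le_foldl_max (ls.map f) (f w)).1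
      omega
    · have := (PySem.List.le_foldl_max (ls.map f) (f v)).2 (f w) (List.mem_map_of_mem h)
      omega

lemma pvBody_eq (f : String → Int) (l : List String) (m : Int)
    (hne : l ≠ []) (hub : ∀ w ∈ l, f w ≤ m) (hat : ∃ w ∈ l, f w = m) :
    pvBody f l = 1 + m := by
  obtain ⟨w, hw, hfw⟩ := hat
  have h1 := pvBody_le f l m hub hne
  have h2 := pvBody_ge_mem f l w hw
  omega

lemma pvDf_nil (T : String → List String) (k : Nat) (u : String) (h : T u = []) :
    pvDf T k u = 0 := by
  cases k with
  | zero => rfl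
  | succ k => show pvBody _ (T u) = 0; rw [h, pvBody_nil]

lemma pvDf_ge_closed (T : String → List String) (P : String → Prop)
    (hcl : ∀ v, P v → ∃ w ∈ T v, P w) :
    ∀ (k : Nat) (v : String), P v → (k : Int) ≤ pvDf T k v := by
  intro k
  induction k with
  | zero => intro v _; simp [pvDf]
  | succ k ih =>
    intro v hv
    obtain ⟨w, hw, hPw⟩ := hcl v hv
    have h1 := ih w hPw
    have h2 := pvBody_ge_mem (pvDf T k) (T v) w hw
    show ((k : Int) + 1) ≤ pvBody (pvDf T k) (T v)
    omega

lemma pvCountP_or (l : List String) (p q : String → Bool)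
    (hdisj : ∀ x ∈ l, ¬(p x = true ∧ q x = true)) :
    l.countP (fun x => p x || q x) = l.countP p + l.countP q := by
  induction l with
  | nil => simp
  | cons a l ih =>
    have hd := hdisj a List.mem_cons_self
    have ihl := ih (fun x hx => hdisj x (List.mem_cons_of_mem _ hx))
    cases hp : p a <;> cases hq : q a <;>
      simp [List.countP_cons, hp, hq, ihl] <;>
      first
      | omega
      | exact absurd ⟨hp, hq⟩ hd

lemma pvSumCount (l : List String) : ∀ (us : List String), us.Nodup →
    (us.map (fun u => l.count u)).sum = l.countP (fun x => decide (x ∈ us)) := by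
  intro us
  induction us with
  | nil => intro _; simp
  | cons u us ih =>
    intro hnd
    have ⟨hu, hnd'⟩ := List.nodup_cons.mp hnd
    simp only [List.map_cons, List.sum_cons, ih hnd']
    have hcongr : l.countP (fun x => decide (x ∈ u :: us))
        = l.countP (fun x => (x == u) || decide (x ∈ us)) := by
      apply List.countP_congr
      intro x _
      simp [List.mem_cons]
    rw [hcongr, pvCountP_or l (fun x => x == u) (fun x => decide (x ∈ us))
      (by intro x _ ⟨h1, h2⟩
          rw [beq_iff_eq] at h1
          subst h1
          exact hu (by simpa using h2)), List.count_eq_countP]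

lemma pvCountP_sandwich (p q : String → Bool) :
    ∀ (l : List String), (∀ x ∈ l, q x = true → p x = true) → l.countP p ≤ l.countP q →
    ∀ x ∈ l, p x = true → q x = true := by
  intro l
  induction l with
  | nil => intro _ _ x hx; cases hx
  | cons a l ih =>
    intro himp hle x hx hp
    have himp' : ∀ x ∈ l, q x = true → p x = true :=
      fun x hx h => himp x (List.mem_cons_of_mem _ hx) h
    have htail : l.countP q ≤ l.countP p := List.countP_mono_left himp'
    rcases List.mem_cons.mp hx with h | h
    · subst h
      by_contra hq
      have hq' : q x = false := by
        cases hqx : q x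
        · rfl
        · exact absurd hqx hq
      simp only [List.countP_cons, hp, hq', if_pos, if_neg] at hle
      simp at hle
      omega
    · -- tail member: need tail count inequality
      have hhead : (if q a = true then 1 else 0) ≤ (if p a = true then 1 else 0) := by
        cases hqa : q a
        · simp
        · simp [himp a List.mem_cons_self hqa]
      simp only [List.countP_cons] at hle
      exact ih himp' (by omega) x h hp

lemma pvMain (K : List String) (hK : K.Nodup)
    (adj tgts : PySem.Dict String (List String))
    (hT : ∀ u v, v ∈ pvT tgts u → v ∈ K)
    (hKT : ∀ w, w ∉ K → pvT tgts w = [])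
    (hC : ∀ u v, ((adj.getD u []).count v) = ((pvT tgts v).count u)) :
    ∀ (fuel : Nat) (d : PySem.Dict String Int) (q ans : List String)
      (ρ : String → Nat) (r : Nat),
    K.length + 1 ≤ fuel + ans.length →
    (∀ v, pvFval d v = (((pvT tgts v).countP (fun x => decide (x ∉ ans))) : Int)) →
    (ans ++ q).Nodup →
    (∀ v ∈ ans ++ q, v ∈ K) →
    (∀ v ∈ ans ++ q, ∀ w ∈ pvT tgts v, w ∈ ans) →
    (∀ v ∈ K, v ∉ ans → v ∉ q → ∃ w ∈ pvT tgts v, w ∉ ans) →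
    (∀ v ∈ ans, ρ v < r) →
    (∀ v ∈ q, ρ v = r) →
    (∀ v ∈ ans ++ q, ∀ k : Nat, ρ v ≤ k → pvDf (pvT tgts) k v = (ρ v : Int)) →
    r ≤ ans.length →
    ans.Pairwise (fun a b => (toLex ((ρ a : Int), a) : Lex (Int × String)) < toLex ((ρ b : Int), b)) →
    solveLoopA fuel d adj q ans
      = PySem.List.sorted
          (K.filter (fun u => decide (pvDf (pvT tgts) K.length u < (K.length : Int))))
          (fun u => (toLex (pvDf (pvT tgts) K.length u, u) : Lex (Int × String))) false := by
  set T := pvT tgts with hTdef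
  set n := K.length with hn
  intro fuel
  induction fuel with
  | zero =>
    intro d q ans ρ r HF I1 I2 IK I3 I4 G1a G1b G2 G5 G4
    exfalso
    have hans : ans.Nodup := (List.nodup_append.mp I2).1
    have hsub : ans ⊆ K := fun v hv => IK v (List.mem_append.mpr (Or.inl hv))
    have := (List.subperm_of_subset hans hsub).length_le
    omega
  | succ fuel ih =>
    intro d q ans ρ r HF I1 I2 IK I3 I4 G1a G1b G2 G5 G4
    have hans : ans.Nodup := (List.nodup_append.mp I2).1
    have hqnd : q.Nodup := (List.nodup_append.mp I2).2.1
    have hdisj : List.Disjoint ans q := List.disjoint_of_nodup_append I2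
    have hsub : ans ⊆ K := fun v hv => IK v (List.mem_append.mpr (Or.inl hv))
    have hanslen : ans.length ≤ n := (List.subperm_of_subset hans hsub).length_le
    by_cases hq : q = []
    · -- termination: ans is exactly the finite-depth nodes in (level, name) order
      subst hq
      show solveLoopA (fuel + 1) d adj [] ans = _
      rw [show solveLoopA (fuel + 1) d adj [] ans = ans from by simp [solveLoopA]]
      -- membership
      have hmem : ∀ v, v ∈ ans ↔ v ∈ K ∧ pvDf T n v < (n : Int) := by
        intro v
        constructor
        · intro hv
          refine ⟨hsub hv, ?_⟩
          have h1 : ρ v < r := G1a v hv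
          have h2 : ρ v < n := by omega
          rw [G2 v (List.mem_append.mpr (Or.inl hv)) n (by omega)]
          exact_mod_cast h2
        · rintro ⟨hvK, hvd⟩
          by_contra hvans
          have hclosed : ∀ x, (x ∈ K ∧ x ∉ ans) → ∃ w ∈ T x, (w ∈ K ∧ w ∉ ans) := by
            rintro x ⟨hxK, hxans⟩
            obtain ⟨w, hw, hwans⟩ := I4 x hxK hxans (List.not_mem_nil)
            exact ⟨w, hw, hT x w hw, hwans⟩
          have := pvDf_ge_closed T (fun x => x ∈ K ∧ x ∉ ans) hclosed n v ⟨hvK, hvans⟩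
          omega
      have hXnd : (K.filter (fun u => decide (pvDf T n u < (n : Int)))).Nodup :=
        hK.filter _
      have hperm : ans.Perm (K.filter (fun u => decide (pvDf T n u < (n : Int)))) := by
        rw [List.perm_ext_iff_of_nodup hans hXnd]
        intro v
        rw [List.mem_filter, hmem v]
        simp
      have hpw : ans.Pairwise (fun a b =>
          (toLex (pvDf T n a, a) : Lex (Int × String)) < toLex (pvDf T n b, b)) := by
        refine G4.imp_of_mem ?_
        intro a b ha hb hlt
        rw [G2 a (List.mem_append.mpr (Or.inl ha)) n (by have := G1a a ha; omega),
          G2 b (List.mem_append.mpr (Or.inl hb)) n (by have := G1b; have := G1a b hb; omega)]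
        exact hlt
      exact (PySem.List.sorted_eq_of_perm_of_pairwise_lt _ ans _ hperm hpw).symm
    · -- one BFS round
      show solveLoopA (fuel + 1) d adj q ans = _
      rw [show solveLoopA (fuel + 1) d adj q ans
          = solveLoopA fuel
              ((((PySem.List.sorted q (fun u => u) false).flatMap
                  (fun u => adj.getD u [])).foldl pvDec (d, [])).1)
              adj
              ((((PySem.List.sorted q (fun u => u) false).flatMap
                  (fun u => adj.getD u [])).foldl pvDec (d, [])).2)
              (ans ++ PySem.List.sorted q (fun u => u) false) from by
        simp only [solveLoopA, if_neg hq]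
        rw [pvRoundA]]
      set qs := PySem.List.sorted q (fun u => u) false with hqs
      have hqsq : qs.Perm q := PySem.List.sorted_perm q _ false
      have hqsne : qs ≠ [] := by rw [Ne, PySem.List.sorted_eq_nil_iff]; exact hq
      have hqsnd : qs.Nodup := hqsq.nodup_iff.mpr hqnd
      have hqs_to_q : ∀ x ∈ qs, x ∈ q := fun x hx => hqsq.subset hx
      have hq_to_qs : ∀ x ∈ q, x ∈ qs := fun x hx => hqsq.symm.subset hx
      have hqsans : ∀ x ∈ qs, x ∉ ans := fun x hx hxa => hdisj hxa (hqs_to_q x hx)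
      set L := qs.flatMap (fun u => adj.getD u []) with hL
      obtain ⟨t, ht2, htnd, htmem⟩ := pvDec_snd L d []
      rw [List.nil_append] at ht2
      -- edge-count translation: occurrences of w's targets inside this round's frontier
      have hLcount : ∀ w, L.count w = (T w).countP (fun x => decide (x ∈ qs)) := by
        intro w
        rw [hL, List.count_flatMap,
          List.map_congr_left (fun u (_ : u ∈ qs) => by
            show (List.count w ∘ fun u => adj.getD u []) u = (T w).count u
            exact hC u w),
          pvSumCount (T w) qs hqsnd]
      have hcQle : ∀ w, (T w).countP (fun x => decide (x ∈ qs))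
          ≤ (T w).countP (fun x => decide (x ∉ ans)) := by
        intro w
        refine List.countP_mono_left ?_
        intro x _ hx
        simp only [decide_eq_true_eq] at hx ⊢
        exact hqsans x hx
      -- the collected frontier t = nodes all of whose unfinished targets lie in this round
      have hchar : ∀ w, w ∈ t ↔ ((∃ x ∈ T w, x ∉ ans) ∧ ∀ x ∈ T w, x ∉ ans → x ∈ qs) := by
        intro w
        rw [htmem w, I1 w]
        have hcast : (L.count w : Int) = ((T w).countP (fun x => decide (x ∈ qs)) : Int) := by
          exact_mod_cast hLcount w
        rw [hcast]
        constructor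
        · rintro ⟨h1, h2⟩
          have h1' : 0 < (T w).countP (fun x => decide (x ∉ ans)) := by exact_mod_cast h1
          have h2' : (T w).countP (fun x => decide (x ∉ ans))
              ≤ (T w).countP (fun x => decide (x ∈ qs)) := by exact_mod_cast h2
          obtain ⟨x, hx, hxd⟩ := List.countP_pos_iff.mp h1'
          refine ⟨⟨x, hx, by simpa using hxd⟩, ?_⟩
          intro x hx hxans
          have := pvCountP_sandwich _ _ (T w)
            (fun y _ hy => by
              simp only [decide_eq_true_eq] at hy ⊢
              exact hqsans y hy) h2' x hx (by simpa using hxans)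
          simpa using this
        · rintro ⟨⟨x, hx, hxans⟩, hall⟩
          constructor
          · have : 0 < (T w).countP (fun x => decide (x ∉ ans)) :=
              List.countP_pos_iff.mpr ⟨x, hx, by simpa using hxans⟩
            exact_mod_cast this
          · have : (T w).countP (fun x => decide (x ∉ ans))
                ≤ (T w).countP (fun x => decide (x ∈ qs)) := by
              refine List.countP_mono_left ?_
              intro y hy hyd
              simp only [decide_eq_true_eq] at hyd ⊢
              exact hall y hy hyd
            exact_mod_cast this
      -- members of t are brand new
      have hfresh : ∀ w ∈ t, w ∉ ans ++ qs := by
        intro w hw hmem'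
        obtain ⟨⟨x, hx, hxans⟩, _⟩ := (hchar w).mp hw
        have hwq : w ∈ ans ++ q := by
          rcases List.mem_append.mp hmem' with h | h
          · exact List.mem_append.mpr (Or.inl h)
          · exact List.mem_append.mpr (Or.inr (hqs_to_q w h))
        exact hxans (I3 w hwq x hx)
      have htK : ∀ w ∈ t, w ∈ K := by
        intro w hw
        obtain ⟨⟨x, hx, _⟩, _⟩ := (hchar w).mp hw
        by_contra hwK
        rw [hKT w hwK] at hx
        cases hx
      -- the in-degree split across the round
      have hsplit : ∀ v, (T v).countP (fun x => decide (x ∉ ans))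
          = (T v).countP (fun x => decide (x ∈ qs))
            + (T v).countP (fun x => decide (x ∉ ans ++ qs)) := by
        intro v
        rw [← pvCountP_or (T v) (fun x => decide (x ∈ qs)) (fun x => decide (x ∉ ans ++ qs))
          (by
            intro x _ ⟨h1, h2⟩
            simp only [decide_eq_true_eq] at h1 h2
            exact h2 (List.mem_append.mpr (Or.inr h1)))]
        apply List.countP_congr
        intro x _
        by_cases h1 : x ∈ qs
        · simp [h1, hqsans x h1]
        · by_cases h2 : x ∈ ans <;> simp [h1, h2]
      rw [ht2]
      -- apply the induction hypothesis at the next round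
      refine ih _ t (ans ++ qs) (fun v => if v ∈ t then r + 1 else ρ v) (r + 1)
        ?_ ?_ ?_ ?_ ?_ ?_ ?_ ?_ ?_ ?_ ?_
      · -- fuel budget
        have : 0 < qs.length := List.length_pos_iff.mpr hqsne
        rw [List.length_append]
        omega
      · -- I1
        intro v
        rw [pvDec_fst, I1 v]
        have hc1 : (L.count v : Int) = ((T v).countP (fun x => decide (x ∈ qs)) : Int) := by
          exact_mod_cast hLcount v
        rw [hc1]
        have := hsplit v
        omega
      · -- I2
        have hnd1 : (ans ++ qs).Nodup := by
          refine List.Nodup.append hans hqsnd ?_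
          intro a ha hb
          exact hqsans a hb ha
        exact List.Nodup.append hnd1 htnd (fun a ha hb => hfresh a hb ha)
      · -- IK
        intro v hv
        rcases List.mem_append.mp hv with h | h
        · rcases List.mem_append.mp h with h' | h'
          · exact IK v (List.mem_append.mpr (Or.inl h'))
          · exact IK v (List.mem_append.mpr (Or.inr (hqs_to_q v h')))
        · exact htK v h
      · -- I3
        intro v hv w hw
        rcases List.mem_append.mp hv with h | h
        · have : w ∈ ans := by
            rcases List.mem_append.mp h with h' | h'
            · exact I3 v (List.mem_append.mpr (Or.inl h')) w hw
            · exact I3 v (List.mem_append.mpr (Or.inr (hqs_to_q v h'))) w hw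
          exact List.mem_append.mpr (Or.inl this)
        · obtain ⟨_, hall⟩ := (hchar v).mp h
          by_cases hwa : w ∈ ans
          · exact List.mem_append.mpr (Or.inl hwa)
          · exact List.mem_append.mpr (Or.inr (hall w hw hwa))
      · -- I4
        intro v hvK hva hvt
        have hvans : v ∉ ans := fun h => hva (List.mem_append.mpr (Or.inl h))
        have hvqs : v ∉ qs := fun h => hva (List.mem_append.mpr (Or.inr h))
        have hvq : v ∉ q := fun h => hvqs (hq_to_qs v h)
        obtain ⟨w, hw, hwans⟩ := I4 v hvK hvans hvq
        by_contra hnone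
        push_neg at hnone
        have hall : ∀ x ∈ T v, x ∉ ans → x ∈ qs := by
          intro x hx hxans
          have := hnone x hx
          rcases List.mem_append.mp this with h | h
          · exact absurd h hxans
          · exact h
        exact hvt ((hchar v).mpr ⟨⟨w, hw, hwans⟩, hall⟩)
      · -- G1a
        intro v hv
        show (if v ∈ t then r + 1 else ρ v) < r + 1
        rw [if_neg (fun h => hfresh v h hv)]
        rcases List.mem_append.mp hv with h | h
        · have := G1a v h; omega
        · have := G1b v (hqs_to_q v h); omega
      · -- G1b
        intro v hv
        show (if v ∈ t then r + 1 else ρ v) = r + 1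
        rw [if_pos hv]
      · -- G2
        intro v hv k hk
        simp only at hk ⊢
        rcases List.mem_append.mp hv with h | h
        · rw [if_neg (fun h' => hfresh v h' h)] at hk ⊢
          have hv' : v ∈ ans ++ q := by
            rcases List.mem_append.mp h with h' | h'
            · exact List.mem_append.mpr (Or.inl h')
            · exact List.mem_append.mpr (Or.inr (hqs_to_q v h'))
          exact G2 v hv' k hk
        · rw [if_pos h] at hk ⊢
          obtain ⟨⟨x0, hx0, hx0ans⟩, hall⟩ := (hchar v).mp h
          match k, hk with
          | m + 1, hk =>
            have hrm : r ≤ m := by omega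
            show pvBody (pvDf T m) (T v) = ((r + 1 : Nat) : Int)
            have hub : ∀ w ∈ T v, pvDf T m w ≤ (r : Int) := by
              intro w hw
              by_cases hwa : w ∈ ans
              · rw [G2 w (List.mem_append.mpr (Or.inl hwa)) m
                  (by have := G1a w hwa; omega)]
                have := G1a w hwa
                exact_mod_cast by omega
              · have hwqs : w ∈ qs := hall w hw hwa
                rw [G2 w (List.mem_append.mpr (Or.inr (hqs_to_q w hwqs))) m
                  (by rw [G1b w (hqs_to_q w hwqs)]; omega)]
                rw [G1b w (hqs_to_q w hwqs)]
            have hat : ∃ w ∈ T v, pvDf T m w = (r : Int) := by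
              refine ⟨x0, hx0, ?_⟩
              have hx0qs : x0 ∈ qs := hall x0 hx0 hx0ans
              rw [G2 x0 (List.mem_append.mpr (Or.inr (hqs_to_q x0 hx0qs))) m
                (by rw [G1b x0 (hqs_to_q x0 hx0qs)]; omega)]
              rw [G1b x0 (hqs_to_q x0 hx0qs)]
            rw [pvBody_eq (pvDf T m) (T v) (r : Int)
              (by intro h'; rw [h'] at hx0; cases hx0) hub hat]
            push_cast
            ring
      · -- G5
        have : 0 < qs.length := List.length_pos_iff.mpr hqsne
        rw [List.length_append]
        omega
      · -- G4
        rw [List.pairwise_append]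
        refine ⟨?_, ?_, ?_⟩
        · refine G4.imp_of_mem ?_
          intro a b ha hb hlt
          simp only
          rw [if_neg (fun h => hfresh a h (List.mem_append.mpr (Or.inl ha))),
            if_neg (fun h => hfresh b h (List.mem_append.mpr (Or.inl hb)))]
          exact hlt
        · have hle : qs.Pairwise (fun a b => a ≤ b) := by
            have := PySem.List.sorted_pairwise q (fun u => u)
            exact this
          refine (hle.and hqsnd).imp_of_mem ?_
          intro a b ha hb hab
          simp only
          rw [if_neg (fun h => hfresh a h (List.mem_append.mpr (Or.inr ha))),
            if_neg (fun h => hfresh b h (List.mem_append.mpr (Or.inr hb))),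
            G1b a (hqs_to_q a ha), G1b b (hqs_to_q b hb)]
          exact Prod.Lex.lt_iff.mpr (Or.inr ⟨rfl, lt_of_le_of_ne hab.1 hab.2⟩)
        · intro a ha b hb
          simp only
          rw [if_neg (fun h => hfresh a h (List.mem_append.mpr (Or.inl ha))),
            if_neg (fun h => hfresh b h (List.mem_append.mpr (Or.inr hb))),
            G1b b (hqs_to_q b hb)]
          refine Prod.Lex.lt_iff.mpr (Or.inl ?_)
          have := G1a a ha
          simp only [ofLex_toLex]
          push_cast
          omega

lemma pvFinal (relations : List String) :
    solve relations = solve_alt relations := by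
  unfold solve
  simp only
  set st := relations.foldl solveParseStepA (PySem.Dict.empty, PySem.Dict.empty) with hst
  set tgts := relations.foldl solveParseStepB PySem.Dict.empty with htgts
  have hinv : pvInv st.1 st.2 tgts := pvParseInv relations _ _ pvInv_empty
  obtain ⟨hk, hd, hc, hm, ht⟩ := hinv
  have hdnd : st.1.keys.Nodup := pvParse_nodup relations _ (by simp [PySem.Dict.keys_empty])
  have hK : tgts.keys.Nodup := hk ▸ hdnd
  have hsize : st.1.size = tgts.keys.length := by
    rw [← hk]
    simp [PySem.Dict.keys, PySem.Dict.size]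
  rw [PySem.List.foldl_append_ite_eq_filter (fun u => st.1.getD u 0 = 0) st.1.keys []]
  rw [List.nil_append]
  rw [pvAlt_eq relations]
  rw [pvSorted2_toLex]
  rw [← htgts]
  have hTd : ∀ v, pvT tgts v = tgts.getD v [] := fun _ => rfl
  have hlen0 : ∀ v, st.1.getD v 0 = ((pvT tgts v).length : Int) := by
    intro v; rw [hTd]; exact hd v
  rw [hsize]
  apply pvMain tgts.keys hK st.2 tgts
  · intro u v hv
    exact ht u v hv
  · intro w hw
    exact pvTK tgts w hw
  · intro u v
    rw [hTd]
    exact hc u v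
  · -- HF
    simp
  · -- I1
    intro v
    unfold pvFval
    rw [hlen0 v]
    congr 1
    simp
  · -- I2
    simp only [List.nil_append]
    exact hdnd.filter _
  · -- IK
    intro v hv
    simp only [List.nil_append, List.mem_filter] at hv
    rw [← hk]
    exact hv.1
  · -- I3
    intro v hv w hw
    simp only [List.nil_append, List.mem_filter, decide_eq_true_eq] at hv
    have : (pvT tgts v).length = 0 := by
      have := hlen0 v
      rw [hv.2] at this
      omega
    rw [List.length_eq_zero_iff.mp this] at hw
    cases hw
  · -- I4
    intro v hvK hv1 hv2
    have hvd : ¬ (st.1.getD v 0 = 0) := by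
      intro h0
      exact hv2 (by
        simp only [List.nil_append, List.mem_filter, decide_eq_true_eq]
        exact ⟨hk ▸ hvK, h0⟩)
    have : (pvT tgts v).length ≠ 0 := by
      intro h
      exact hvd (by rw [hlen0 v, h]; rfl)
    match hTv : pvT tgts v, this with
    | w :: ws, _ =>
      exact ⟨w, List.mem_cons_self, List.not_mem_nil⟩
  · -- G1a
    intro v hv
    cases hv
  · -- G1b
    intro v _
    rfl
  · -- G2
    intro v hv k _
    simp only [List.nil_append, List.mem_filter, decide_eq_true_eq] at hv
    have : (pvT tgts v).length = 0 := by
      have := hlen0 v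
      rw [hv.2] at this
      omega
    rw [pvDf_nil _ k v (List.length_eq_zero_iff.mp this)]
    rfl
  · -- G5
    exact Nat.le_refl 0
  · -- G4
    exact List.Pairwise.nil


-- ===== VERDICT (by name: the statement is the Claim_ definition above) =====
theorem solve_spec : Claim_equal_solve := by
  intro relations _ _
  unfold Spec_solve
  exact pvFinal relations
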